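-- pv_equiv track=rewrite | github.com/laholo14/trajet_facteur | controller/ControlPoint.py | Pyramide
-- ===== SOURCE A (Python) =====
-- def Pyramide(liste, max, taille):
--     elementPrecedent = liste[0]
--     for i, element in enumerate(liste):
--         if element == max:
--             for j in reversed(range(0, i - 1)):
--                 for k in range(0, j + 1):
--                     if liste[k] > liste[k + 1]:
--                         return False
--             for j in reversed(range(i, taille - 1)):
--                 for k in range(i, j + 1):
--                     if liste[k] < liste[k + 1]:
--                         return False
--             # liste[0] = 0
--             # liste.append(0)
--             return True
--     return False
-- ===== SOURCE B (Python) =====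
-- def Pyramide(liste, max, taille):
--     if max not in liste:
--         return False
--     i = liste.index(max)
--     return all(liste[k] <= liste[k + 1] for k in range(i - 1)) and \
--            all(liste[k] >= liste[k + 1] for k in range(i, taille - 1))
-- ===== Notes on version B (the rewrite author's own statement) =====
-- stated objective: alternative
-- what changed: Replaces the triple-nested index loops (for each pair-check all sub-ranges are rescanned) with a single index lookup of max plus one linear ascending-prefix pass and one linear descending-suffix pass.
-- outside the precondition, e.g. on Pyramide([1, 2], 1, 5): A returns False, B returns False
import Mathlib
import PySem

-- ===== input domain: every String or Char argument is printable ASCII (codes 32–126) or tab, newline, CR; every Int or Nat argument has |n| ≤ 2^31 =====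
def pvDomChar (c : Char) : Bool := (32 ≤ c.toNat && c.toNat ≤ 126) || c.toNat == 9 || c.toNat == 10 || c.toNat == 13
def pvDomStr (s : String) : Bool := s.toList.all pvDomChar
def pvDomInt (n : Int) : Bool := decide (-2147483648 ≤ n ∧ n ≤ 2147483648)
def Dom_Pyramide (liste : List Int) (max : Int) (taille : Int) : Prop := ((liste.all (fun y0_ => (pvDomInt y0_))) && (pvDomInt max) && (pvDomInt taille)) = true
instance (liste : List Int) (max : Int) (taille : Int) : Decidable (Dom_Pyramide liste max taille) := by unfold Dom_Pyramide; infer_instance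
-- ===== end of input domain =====

-- B replaces A's triple-nested rescanning loops with one index lookup and two linear passes (return value equivalence; timing unconfirmed).


-- ===== PORT A =====
-- the first inner double loop: any j in reversed(range(0, i-1)), any k in range(0, j+1) with liste[k] > liste[k+1]
def pyrAscViol (liste : List Int) (i : Int) : Bool :=
  ((PySem.List.pyRange 0 (i - 1) 1).reverse).any (fun j =>
    (PySem.List.pyRange 0 (j + 1) 1).any (fun k =>
      decide (PySem.List.pyGetD liste k 0 > PySem.List.pyGetD liste (k + 1) 0)))

-- the second inner double loop: any j in reversed(range(i, taille-1)), any k in range(i, j+1) with liste[k] < liste[k+1]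
def pyrDescViol (liste : List Int) (i taille : Int) : Bool :=
  ((PySem.List.pyRange i (taille - 1) 1).reverse).any (fun j =>
    (PySem.List.pyRange i (j + 1) 1).any (fun k =>
      decide (PySem.List.pyGetD liste k 0 < PySem.List.pyGetD liste (k + 1) 0)))

-- the 'for i, element in enumerate(liste)' loop with its early returns
def pyrALoop (liste : List Int) (max taille : Int) : List (Int × Int) → Bool
  | [] => false
  | (i, element) :: rest =>
    if element = max then
      if pyrAscViol liste i then false
      else if pyrDescViol liste i taille then false
      else true
    else pyrALoop liste max taille rest

def Pyramide (liste : List Int) (max : Int) (taille : Int) : Bool :=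
  pyrALoop liste max taille (PySem.List.enumerate liste 0)

-- ===== PORT B =====
def Pyramide_alt (liste : List Int) (max : Int) (taille : Int) : Bool :=
  if liste.contains max then
    match PySem.List.index? liste max with
    | none => false  -- unreachable: membership was just checked (Python's .index cannot raise here)
    | some i =>
      ((PySem.List.pyRange 0 ((i : Int) - 1) 1).all (fun k =>
          decide (PySem.List.pyGetD liste k 0 ≤ PySem.List.pyGetD liste (k + 1) 0))) &&
      ((PySem.List.pyRange (i : Int) (taille - 1) 1).all (fun k =>
          decide (PySem.List.pyGetD liste k 0 ≥ PySem.List.pyGetD liste (k + 1) 0)))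
  else false

-- ===== PRECONDITION & SPEC =====
-- Pre_ excludes the empty list (liste[0] raises IndexError) and the case max ∈ liste with taille > len(liste),
-- where A's descending scan reads past the end: A raises IndexError there unless it happens to find a
-- violating pair before the out-of-range index (then it returns False, as B does — see the cite in claim.json).
def Pre_Pyramide (liste : List Int) (max : Int) (taille : Int) : Prop :=
  liste ≠ [] ∧ (taille ≤ (liste.length : Int) ∨ max ∉ liste)
instance (liste : List Int) (max : Int) (taille : Int) : Decidable (Pre_Pyramide liste max taille) := by unfold Pre_Pyramide; infer_instance
def pvWitness_Pyramide : List Int × Int × Int := ([1, 2, 1], 2, 3)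

def Spec_Pyramide (liste : List Int) (max : Int) (taille : Int) (out : Bool) : Prop := out = Pyramide_alt liste max taille
instance (liste : List Int) (max : Int) (taille : Int) (out : Bool) : Decidable (Spec_Pyramide liste max taille out) := by unfold Spec_Pyramide; infer_instance

-- ===== CLAIM (what is proved, stated in full; the proofs are below) =====
def Claim_equal_Pyramide : Prop := ∀ (liste : List Int) (max : Int) (taille : Int), Dom_Pyramide liste max taille → Pre_Pyramide liste max taille → Spec_Pyramide liste max taille (Pyramide liste max taille)

-- ===== LEMMAS AND PROOFS =====

-- A's double 'any j, any k ≤ j' scan over a range is the single 'any k' scan over the same range.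
lemma anyany (a b : Int) (f : Int → Bool) :
    ((PySem.List.pyRange a b 1).reverse).any (fun j => (PySem.List.pyRange a (j + 1) 1).any f)
      = (PySem.List.pyRange a b 1).any f := by
  rw [List.any_reverse, Bool.eq_iff_iff]
  simp only [List.any_eq_true, PySem.List.mem_pyRange_one]
  constructor
  · rintro ⟨j, ⟨hj1, hj2⟩, k, ⟨hk1, hk2⟩, hf⟩
    exact ⟨k, ⟨hk1, by omega⟩, hf⟩
  · rintro ⟨k, ⟨hk1, hk2⟩, hf⟩
    exact ⟨k, ⟨hk1, hk2⟩, k, ⟨hk1, by omega⟩, hf⟩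

-- B's 'all pairs in order' is the complement of A's 'any violating pair'.
lemma allAsc (liste : List Int) (a b : Int) :
    (PySem.List.pyRange a b 1).all (fun k =>
        decide (PySem.List.pyGetD liste k 0 ≤ PySem.List.pyGetD liste (k + 1) 0))
      = !((PySem.List.pyRange a b 1).any (fun k =>
        decide (PySem.List.pyGetD liste k 0 > PySem.List.pyGetD liste (k + 1) 0))) := by
  induction PySem.List.pyRange a b 1 with
  | nil => rfl
  | cons x xs ih =>
    simp only [List.all_cons, List.any_cons, Bool.not_or, ih]
    congr 1
    simp [← decide_not]

lemma allDesc (liste : List Int) (a b : Int) :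
    (PySem.List.pyRange a b 1).all (fun k =>
        decide (PySem.List.pyGetD liste k 0 ≥ PySem.List.pyGetD liste (k + 1) 0))
      = !((PySem.List.pyRange a b 1).any (fun k =>
        decide (PySem.List.pyGetD liste k 0 < PySem.List.pyGetD liste (k + 1) 0))) := by
  induction PySem.List.pyRange a b 1 with
  | nil => rfl
  | cons x xs ih =>
    simp only [List.all_cons, List.any_cons, Bool.not_or, ih]
    congr 1
    simp [← decide_not]

-- the value A returns once it has located max at index i
def pyrBody (liste : List Int) (taille i : Int) : Bool :=
  if pyrAscViol liste i then false
  else if pyrDescViol liste i taille then false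
  else true

-- A's enumerate loop finds the first occurrence of max, i.e. index?.
lemma loopEq (liste : List Int) (max taille : Int) :
    ∀ (l : List Int) (s : Int),
      pyrALoop liste max taille (PySem.List.enumerate l s)
        = match PySem.List.index? l max with
          | none => false
          | some i => pyrBody liste taille (s + (i : Int)) := by
  intro l
  induction l with
  | nil => intro s; simp [PySem.List.enumerate_nil, pyrALoop, PySem.List.index?]
  | cons x xs ih =>
    intro s
    rw [PySem.List.enumerate_cons]
    by_cases hx : x = max
    · subst hx
      rw [PySem.List.index?_cons_self _ xs]
      simp [pyrALoop, pyrBody]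
    · rw [PySem.List.index?_cons_of_ne xs hx]
      simp only [pyrALoop, if_neg hx, ih (s + 1)]
      cases h : PySem.List.index? xs max with
      | none => simp
      | some i =>
        simp only [Option.map_some]
        have : s + 1 + (i : Int) = s + ((i + 1 : Nat) : Int) := by push_cast; ring
        rw [this]

-- the two ifs with early returns are a conjunction of the negated scans
lemma iteBool (p q : Bool) : (if p then false else if q then false else true) = (!p && !q) := by
  cases p <;> cases q <;> rfl

-- A's body at the found index equals B's two linear passes
lemma bodyEq (liste : List Int) (taille i : Int) :
    pyrBody liste taille i =
      (((PySem.List.pyRange 0 (i - 1) 1).all (fun k =>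
          decide (PySem.List.pyGetD liste k 0 ≤ PySem.List.pyGetD liste (k + 1) 0))) &&
       ((PySem.List.pyRange i (taille - 1) 1).all (fun k =>
          decide (PySem.List.pyGetD liste k 0 ≥ PySem.List.pyGetD liste (k + 1) 0)))) := by
  unfold pyrBody pyrAscViol pyrDescViol
  rw [iteBool, anyany, anyany, allAsc, allDesc]

-- ===== VERDICT (by name: the statement is the Claim_ definition above) =====
theorem Pyramide_spec : Claim_equal_Pyramide := by
  intro liste max taille _ _
  unfold Spec_Pyramide Pyramide Pyramide_alt
  rw [loopEq liste max taille liste 0]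
  cases h : PySem.List.index? liste max with
  | none =>
    have : ¬ max ∈ liste := (PySem.List.index?_eq_none_iff liste max).1 h
    simp [this]
  | some i =>
    have hs : (PySem.List.index? liste max).isSome = true := by rw [h]; rfl
    have hmem : max ∈ liste := (PySem.List.index?_isSome_iff liste max).1 hs
    rw [if_pos (by simpa using hmem)]
    simp only [bodyEq, zero_add]
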